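-- pv_equiv track=rewrite | github.com/Namnguyenh0210/CBS01 | Project_end/bai2.py | find_repeating_elements
-- ===== SOURCE A (Python) =====
-- def find_repeating_elements(nums):
--     n = len(nums)
--     count = {} # từ điển luu lan suat hien cua phan tu
--     for num in nums:
--         if num in count:
--             count[num] += 1
--         else:
--             count[num] = 1
--
--     result = []
--     for num, freq in count.items(): # freq tần suất, count.items tra ve danh sach cac phan tu
--         if freq > n // 3:
--             result.append(num)
--
--     return result
-- ===== SOURCE B (Python) =====
-- def find_repeating_elements(nums):
--     n = len(nums)
--     # Boyer-Moore majority vote (n/3 variant): one pass, two candidate slots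
--     c1, n1, c2, n2 = None, 0, None, 0
--     for x in nums:
--         if n1 > 0 and x == c1:
--             n1 += 1
--         elif n2 > 0 and x == c2:
--             n2 += 1
--         elif n1 == 0:
--             c1, n1 = x, 1
--         elif n2 == 0:
--             c2, n2 = x, 1
--         else:
--             n1 -= 1
--             n2 -= 1
--     # verify the (<=2) surviving candidates, emitting in first-appearance order
--     result = []
--     seen = set()
--     for x in nums:
--         if x not in seen:
--             seen.add(x)
--             if (x == c1 or x == c2) and nums.count(x) > n // 3:
--                 result.append(x)
--     return result
-- ===== Notes on version B (the rewrite author's own statement) =====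
-- stated objective: alternative
-- what changed: Replaces the hash-counter pass plus dict-items scan by the Boyer-Moore n/3 majority-vote pass (two candidate slots with counters), followed by a verification scan that emits the qualifying candidates in first-appearance order.
import Mathlib
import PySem

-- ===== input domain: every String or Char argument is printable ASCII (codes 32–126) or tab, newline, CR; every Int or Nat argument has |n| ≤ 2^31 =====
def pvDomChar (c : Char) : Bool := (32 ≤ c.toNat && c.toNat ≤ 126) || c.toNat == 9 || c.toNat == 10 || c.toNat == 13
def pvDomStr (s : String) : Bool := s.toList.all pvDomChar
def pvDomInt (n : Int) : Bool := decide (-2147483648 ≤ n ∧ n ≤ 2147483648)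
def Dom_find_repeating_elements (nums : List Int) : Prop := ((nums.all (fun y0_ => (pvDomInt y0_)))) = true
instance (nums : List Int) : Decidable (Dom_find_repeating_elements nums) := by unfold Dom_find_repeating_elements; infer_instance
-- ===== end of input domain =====

-- B replaces A's hash-counter + dict-items scan by a Boyer-Moore n/3 majority-vote pass with
-- verification, emitting qualifying values in first-appearance order (alternative algorithm, same result).


-- ===== PORT A =====
def find_repeating_elements (nums : List Int) : List Int :=
  let n : Int := nums.length
  let count : PySem.Dict Int Int :=
    nums.foldl (fun d num =>
      if d.contains num then d.insert num (d.getD num 0 + 1)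
      else d.insert num 1) PySem.Dict.empty
  let result : List Int :=
    count.items.foldl (fun acc p =>
      if PySem.Int.floordiv n 3 < p.2 then acc ++ [p.1] else acc) []
  result

-- ===== PORT B =====
-- one step of the Boyer-Moore n/3 vote; `none` models Python's initial `None` candidate
def bmStep (s : Option Int × Int × Option Int × Int) (x : Int) : Option Int × Int × Option Int × Int :=
  match s with
  | (c1, n1, c2, n2) =>
    if 0 < n1 ∧ some x = c1 then (c1, n1 + 1, c2, n2)
    else if 0 < n2 ∧ some x = c2 then (c1, n1, c2, n2 + 1)
    else if n1 = 0 then (some x, 1, c2, n2)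
    else if n2 = 0 then (c1, n1, some x, 1)
    else (c1, n1 - 1, c2, n2 - 1)

def find_repeating_elements_alt (nums : List Int) : List Int :=
  let n : Int := nums.length
  let s := nums.foldl bmStep (none, 0, none, 0)
  match s with
  | (c1, _, c2, _) =>
    (nums.foldl (fun (st : PySem.Set Int × List Int) x =>
        if PySem.Set.contains st.1 x then st
        else (PySem.Set.add st.1 x,
          if (some x = c1 ∨ some x = c2) ∧ PySem.Int.floordiv n 3 < (PySem.List.count nums x : Int)
          then st.2 ++ [x] else st.2))
      (PySem.Set.empty, [])).2

-- ===== PRECONDITION & SPEC =====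
def Spec_find_repeating_elements (nums : List Int) (out : List Int) : Prop := out = find_repeating_elements_alt nums
instance (nums : List Int) (out : List Int) : Decidable (Spec_find_repeating_elements nums out) := by unfold Spec_find_repeating_elements; infer_instance

-- ===== CLAIM (what is proved, stated in full; the proofs are below) =====
def Claim_equal_find_repeating_elements : Prop := ∀ (nums : List Int), Dom_find_repeating_elements nums → Spec_find_repeating_elements nums (find_repeating_elements nums)

-- ===== LEMMAS AND PROOFS =====

-- A returns the distinct values of nums, in first-appearance order, whose count exceeds n//3
lemma A_char (nums : List Int) :
    find_repeating_elements nums =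
      (PySem.Set.ofList nums).filter
        (fun k => decide (PySem.Int.floordiv (nums.length : Int) 3 < (nums.count k : Int))) := by
  unfold find_repeating_elements
  have h1 : nums.foldl (fun d num =>
      if d.contains num then d.insert num (d.getD num 0 + 1)
      else d.insert num 1) PySem.Dict.empty = PySem.Dict.counter nums := by
    rw [← PySem.Dict.foldl_insert_getD_add_one_eq_counter]
    apply PySem.List.foldl_congr_mem
    intro d x _
    by_cases h : d.contains x
    · simp [h]
    · have h0 : d.getD x 0 = 0 :=
        PySem.Dict.getD_of_not_contains d 0 (by simpa using h)
      simp [h, h0]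
  simp only [h1, PySem.Dict.items_counter,
    PySem.List.foldl_append_ite (p := fun p : Int × Int =>
      PySem.Int.floordiv (nums.length : Int) 3 < p.2) (f := Prod.fst)]
  rw [List.filter_map, List.map_map]
  simp [Function.comp_def]

-- helper: Set.add at a member / non-member
lemma set_add_mem (s : PySem.Set Int) (x : Int) (h : x ∈ s) : PySem.Set.add s x = s := by
  simp [PySem.Set.add, PySem.Set.contains, h]

lemma set_add_not_mem (s : PySem.Set Int) (x : Int) (h : x ∉ s) :
    PySem.Set.add s x = s ++ [x] := by
  simp [PySem.Set.add, PySem.Set.contains, h]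

-- helper: the new elements a seen-set loop over t meets, given `s` already seen
def newOf : List Int → PySem.Set Int → List Int
  | [], _ => []
  | x :: t, s => if PySem.Set.contains s x then newOf t s else x :: newOf t (PySem.Set.add s x)

lemma loop_char (p : Int → Prop) [DecidablePred p] :
    ∀ (t : List Int) (s : PySem.Set Int) (res : List Int),
    (t.foldl (fun (st : PySem.Set Int × List Int) x =>
        if PySem.Set.contains st.1 x then st
        else (PySem.Set.add st.1 x, if p x then st.2 ++ [x] else st.2)) (s, res)).2
      = res ++ (newOf t s).filter (fun x => decide (p x)) := by
  intro t
  induction t with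
  | nil => intro s res; simp [newOf]
  | cons x t ih =>
    intro s res
    simp only [List.foldl_cons]
    by_cases h : x ∈ s
    · rw [if_pos (by simpa [PySem.Set.contains] using h), ih]
      simp [newOf, PySem.Set.contains, h]
    · rw [if_neg (by simpa [PySem.Set.contains] using h), ih]
      have hnew : newOf (x :: t) s = x :: newOf t (PySem.Set.add s x) := by
        simp [newOf, PySem.Set.contains, h]
      rw [hnew]
      by_cases hp : p x <;> simp [hp]

lemma update_eq_append_newOf : ∀ (t : List Int) (s : PySem.Set Int),
    PySem.Set.update s t = s ++ newOf t s := by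
  intro t
  induction t with
  | nil => intro s; simp [PySem.Set.update, newOf]
  | cons x t ih =>
    intro s
    show List.foldl PySem.Set.add (PySem.Set.add s x) t = s ++ newOf (x :: t) s
    by_cases h : x ∈ s
    · rw [set_add_mem s x h,
        show newOf (x :: t) s = newOf t s from by simp [newOf, PySem.Set.contains, h]]
      simpa [PySem.Set.update] using ih s
    · rw [show newOf (x :: t) s = x :: newOf t (PySem.Set.add s x) from by
          simp [newOf, PySem.Set.contains, h],
        set_add_not_mem s x h]
      have h2 := ih (s ++ [x])
      simp only [PySem.Set.update] at h2
      rw [h2]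
      simp

lemma ofList_eq_newOf (t : List Int) : PySem.Set.ofList t = newOf t [] := by
  have := update_eq_append_newOf t []
  simpa [PySem.Set.update, PySem.Set.ofList_eq_foldl] using this

-- the Boyer-Moore invariant: any value outside the two candidate slots occurs in the processed
-- prefix p at most (|p| - n1 - n2)/3 times
def BmInv (p : List Int) (s : Option Int × Int × Option Int × Int) : Prop :=
  0 ≤ s.2.1 ∧ 0 ≤ s.2.2.2 ∧ (0 < s.2.1 → 0 < s.2.2.2 → s.1 ≠ s.2.2.1) ∧ ∀ v : Int,
    3 * (p.count v : Int) ≤ (p.length : Int) - s.2.1 - s.2.2.2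
      + (if some v = s.1 then 3 * s.2.1 else 0)
      + (if some v = s.2.2.1 then 3 * s.2.2.2 else 0)

lemma bmInv_iff (p : List Int) (c1 : Option Int) (n1 : Int) (c2 : Option Int) (n2 : Int) :
    BmInv p (c1, n1, c2, n2) ↔ (0 ≤ n1 ∧ 0 ≤ n2 ∧ (0 < n1 → 0 < n2 → c1 ≠ c2) ∧ ∀ v : Int,
      3 * (p.count v : Int) ≤ (p.length : Int) - n1 - n2
        + (if some v = c1 then 3 * n1 else 0)
        + (if some v = c2 then 3 * n2 else 0)) := Iff.rfl

lemma inv_step (p : List Int) (x : Int) (s : Option Int × Int × Option Int × Int)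
    (h : BmInv p s) : BmInv (p ++ [x]) (bmStep s x) := by
  obtain ⟨c1, n1, c2, n2⟩ := s
  rw [bmInv_iff] at h
  obtain ⟨h1, h2, h4, h3⟩ := h
  have hcnt : ∀ v : Int, ((p ++ [x]).count v : Int)
      = (p.count v : Int) + (if v = x then 1 else 0) := by
    intro v
    by_cases hvx : v = x
    · subst hvx; simp [List.count_append]
    · simp [List.count_append, hvx, Ne.symm hvx]
  have hlen : ((p ++ [x]).length : Int) = (p.length : Int) + 1 := by
    simp [List.length_append]
  simp only [bmStep]
  split_ifs with hA hB hC hD <;> rw [bmInv_iff]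
  · -- x matches candidate 1
    obtain ⟨hn1, hxc1⟩ := hA
    refine ⟨by omega, h2, fun _ hb => h4 hn1 hb, fun v => ?_⟩
    have hv := h3 v
    rw [← hxc1] at hv ⊢
    simp only [hcnt, hlen]
    by_cases hvx : v = x
    · subst hvx
      split_ifs at hv ⊢ <;> simp_all <;> omega
    · have hne : ¬ (some v = some x) := by simp [hvx]
      simp only [hne, if_false, hvx] at hv ⊢
      split_ifs at hv ⊢ <;> simp_all
  · -- x matches candidate 2
    obtain ⟨hn2, hxc2⟩ := hB
    refine ⟨h1, by omega, fun ha _ => h4 ha hn2, fun v => ?_⟩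
    have hv := h3 v
    rw [← hxc2] at hv ⊢
    simp only [hcnt, hlen]
    by_cases hvx : v = x
    · subst hvx
      split_ifs at hv ⊢ <;> simp_all <;> omega
    · have hne : ¬ (some v = some x) := by simp [hvx]
      simp only [hne, if_false, hvx] at hv ⊢
      split_ifs at hv ⊢ <;> simp_all <;> omega
  · -- slot 1 empty: install x
    refine ⟨by norm_num, h2, fun _ hb heq => hB ⟨hb, heq⟩, fun v => ?_⟩
    have hv := h3 v
    rw [hC] at hv
    simp only [mul_zero, ite_self, add_zero, sub_zero] at hv
    simp only [hcnt, hlen]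
    by_cases hvx : v = x
    · subst hvx
      split_ifs at hv ⊢ <;> simp_all <;> omega
    · have hne : ¬ (some v = some x) := by simp [hvx]
      simp only [hne, if_false, hvx]
      split_ifs at hv ⊢ <;> simp_all
  · -- slot 2 empty: install x
    refine ⟨h1, by norm_num, fun ha _ heq => hA ⟨ha, heq.symm⟩, fun v => ?_⟩
    have hv := h3 v
    rw [hD] at hv
    simp only [mul_zero, ite_self, add_zero, sub_zero] at hv
    simp only [hcnt, hlen]
    by_cases hvx : v = x
    · subst hvx
      split_ifs at hv ⊢ <;> simp_all <;> omega
    · have hne : ¬ (some v = some x) := by simp [hvx]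
      simp only [hne, if_false, hvx]
      split_ifs at hv ⊢ <;> simp_all <;> omega
  · -- both slots occupied by other values: decrement both
    have hxc1 : ¬ (some x = c1) := fun hh => hA ⟨by omega, hh⟩
    have hxc2 : ¬ (some x = c2) := fun hh => hB ⟨by omega, hh⟩
    have hcc : c1 ≠ c2 := h4 (by omega) (by omega)
    refine ⟨by omega, by omega, fun _ _ => hcc, fun v => ?_⟩
    have hv := h3 v
    simp only [hcnt, hlen]
    by_cases hvx : v = x
    · subst hvx
      simp only [hxc1, hxc2, if_false] at hv ⊢
      omega
    · simp only [hvx, if_false]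
      split_ifs at hv ⊢ <;> simp_all <;> omega

lemma inv_foldl : ∀ (l p : List Int) (s : Option Int × Int × Option Int × Int),
    BmInv p s → BmInv (p ++ l) (l.foldl bmStep s) := by
  intro l
  induction l with
  | nil => intro p s h; simpa using h
  | cons x t ih =>
    intro p s h
    have := ih (p ++ [x]) (bmStep s x) (inv_step p x s h)
    simpa using this

lemma bm_candidates (nums : List Int) (v : Int)
    (hcnt : (nums.length : Int) < 3 * (nums.count v : Int)) :
    some v = (nums.foldl bmStep (none, 0, none, 0)).1 ∨
    some v = (nums.foldl bmStep (none, 0, none, 0)).2.2.1 := by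
  have hinit : BmInv [] ((none, 0, none, 0) : Option Int × Int × Option Int × Int) := by
    refine ⟨le_refl _, le_refl _, fun h _ => absurd h (lt_irrefl 0), fun v => by simp⟩
  have h := inv_foldl nums [] _ hinit
  simp only [List.nil_append] at h
  obtain ⟨h1, h2, _, h3⟩ := h
  by_contra hc
  push Not at hc
  have hv := h3 v
  rw [if_neg hc.1, if_neg hc.2] at hv
  omega

-- B returns the same filtered first-appearance list
lemma B_char (nums : List Int) :
    find_repeating_elements_alt nums =
      (PySem.Set.ofList nums).filter
        (fun k => decide (PySem.Int.floordiv (nums.length : Int) 3 < (nums.count k : Int))) := by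
  unfold find_repeating_elements_alt
  set st := nums.foldl bmStep (none, 0, none, 0) with hst
  obtain ⟨c1, m1, c2, m2⟩ := st
  simp only []
  rw [loop_char (fun x => (some x = c1 ∨ some x = c2) ∧
      PySem.Int.floordiv (nums.length : Int) 3 < (PySem.List.count nums x : Int))
      nums PySem.Set.empty []]
  rw [show (PySem.Set.empty : PySem.Set Int) = [] from rfl, ← ofList_eq_newOf, List.nil_append]
  apply List.filter_congr
  intro x _
  apply decide_eq_decide.mpr
  rw [PySem.List.count_eq]
  constructor
  · exact fun h => h.2
  · intro h
    refine ⟨?_, h⟩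
    have hlt : (nums.length : Int) < (nums.count x : Int) * 3 := by
      rw [← PySem.Int.floordiv_lt_iff_lt_mul (by norm_num)]; exact h
    have hcand := bm_candidates nums x (by omega)
    rw [← hst] at hcand
    simpa using hcand

-- ===== VERDICT (by name: the statement is the Claim_ definition above) =====
theorem find_repeating_elements_spec : Claim_equal_find_repeating_elements := by
  intro nums _
  unfold Spec_find_repeating_elements
  rw [A_char, B_char]
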